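-- pv_equiv track=rewrite | github.com/sam-pennington/AdventOfCode2024 | python/days/2/solve-2.py | report_safe
-- ===== SOURCE A (Python) =====
-- from typing import Union
--
-- def report_safe(report: list[int]) -> bool:
--     increasing: Union[bool, None] = None
--     for idx, level in enumerate(report):
--         if idx == 0: continue
--         if level == report[idx - 1]: return False
--         level_increasing: bool = level > report[idx - 1]
--         if increasing is None: increasing = level_increasing
--         if increasing != level_increasing: return False
--         delta: int = abs(level - report[idx - 1])
--         if delta < 1 or delta > 3: return False
--     return True
-- ===== SOURCE B (Python) =====
-- def report_safe(report: list[int]) -> bool: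
--     diffs = [report[i] - report[i - 1] for i in range(1, len(report))]
--     return all(1 <= d <= 3 for d in diffs) or all(-3 <= d <= -1 for d in diffs)
-- ===== Notes on version B (the rewrite author's own statement) =====
-- stated objective: simpler
-- what changed: B builds the consecutive-difference list once and tests the whole list against two global range predicates (all ascending-by-1..3 or all descending-by-1..3), replacing A's stateful single pass that tracks a running direction flag with early exits.
import Mathlib
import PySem

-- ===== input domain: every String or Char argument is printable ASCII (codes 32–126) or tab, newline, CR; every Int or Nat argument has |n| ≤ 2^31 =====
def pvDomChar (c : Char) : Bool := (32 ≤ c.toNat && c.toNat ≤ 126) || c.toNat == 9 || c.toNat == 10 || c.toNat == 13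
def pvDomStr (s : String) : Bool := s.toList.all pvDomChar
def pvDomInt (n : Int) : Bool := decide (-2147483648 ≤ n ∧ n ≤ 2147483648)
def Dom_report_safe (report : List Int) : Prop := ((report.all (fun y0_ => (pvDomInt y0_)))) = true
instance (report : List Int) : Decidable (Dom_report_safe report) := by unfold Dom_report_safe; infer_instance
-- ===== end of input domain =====

-- B replaces A's stateful direction-tracking pass (early exits) by a consecutive-difference
-- list tested against two global range predicates; objective: simpler.

-- ===== PORT A =====
-- A's loop over enumerate(report), skipping idx 0; state: previous level and the
-- Optional[bool] 'increasing' flag.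
def reportLoopA (prev : Int) (incr : Option Bool) : List Int → Bool
  | [] => true
  | level :: rest =>
    if level == prev then false
    else
      let levelIncreasing : Bool := decide (level > prev)
      let incr' : Option Bool := match incr with | none => some levelIncreasing | some b => some b
      if incr' ≠ some levelIncreasing then false
      else
        let delta : Int := |level - prev|
        if delta < 1 ∨ delta > 3 then false
        else reportLoopA level incr' rest

def report_safe (report : List Int) : Bool :=
  match report with
  | [] => true
  | first :: rest => reportLoopA first none rest

-- ===== PORT B =====
def report_safe_alt (report : List Int) : Bool :=
  let diffs : List Int := List.zipWith (fun prev cur => cur - prev) report report.tail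
  diffs.all (fun d => decide (1 ≤ d) && decide (d ≤ 3))
    || diffs.all (fun d => decide (-3 ≤ d) && decide (d ≤ -1))

-- ===== PRECONDITION & SPEC =====
def Spec_report_safe (report : List Int) (out : Bool) : Prop := out = report_safe_alt report
instance (report : List Int) (out : Bool) : Decidable (Spec_report_safe report out) := by unfold Spec_report_safe; infer_instance

-- ===== CLAIM (what is proved, stated in full; the proofs are below) =====
def Claim_equal_report_safe : Prop := ∀ (report : List Int), Dom_report_safe report → Spec_report_safe report (report_safe report)

-- ===== LEMMAS AND PROOFS =====

def pvDiffs (prev : Int) (rest : List Int) : List Int :=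
  List.zipWith (fun p c => c - p) (prev :: rest) rest

def pvAllUp (ds : List Int) : Bool := ds.all (fun d => decide (1 ≤ d) && decide (d ≤ 3))
def pvAllDn (ds : List Int) : Bool := ds.all (fun d => decide (-3 ≤ d) && decide (d ≤ -1))

theorem reportLoopA_some_true (prev : Int) (rest : List Int) :
    reportLoopA prev (some true) rest = pvAllUp (pvDiffs prev rest) := by
  induction rest generalizing prev with
  | nil => rfl
  | cons l rs ih =>
    simp only [reportLoopA, pvDiffs, pvAllUp, List.zipWith, List.all_cons] at *
    split_ifs with h1 h2 h3
    · simp only [beq_iff_eq] at h1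
      subst h1
      simp
    · simp only [beq_iff_eq] at h1
      simp only [ne_eq, Option.some.injEq, true_eq_decide_iff, not_lt] at h2
      have : ¬ (1 ≤ l - prev) := by omega
      simp [this]
    · simp only [beq_iff_eq] at h1
      simp only [ne_eq, Option.some.injEq, not_not, true_eq_decide_iff] at h2
      have habs : |l - prev| = l - prev := abs_of_pos (by omega)
      rw [habs] at h3
      have : ¬ (l - prev ≤ 3) := by omega
      simp [this]
    · simp only [beq_iff_eq] at h1
      simp only [ne_eq, Option.some.injEq, not_not, true_eq_decide_iff] at h2
      have habs : |l - prev| = l - prev := abs_of_pos (by omega)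
      rw [habs] at h3
      have hu : (1 : Int) ≤ l - prev := by omega
      have hv : l - prev ≤ 3 := by omega
      rw [ih]
      simp [hu, hv]

theorem reportLoopA_some_false (prev : Int) (rest : List Int) :
    reportLoopA prev (some false) rest = pvAllDn (pvDiffs prev rest) := by
  induction rest generalizing prev with
  | nil => rfl
  | cons l rs ih =>
    simp only [reportLoopA, pvDiffs, pvAllDn, List.zipWith, List.all_cons] at *
    split_ifs with h1 h2 h3
    · simp only [beq_iff_eq] at h1
      subst h1
      simp
    · simp only [beq_iff_eq] at h1
      simp only [ne_eq, Option.some.injEq, false_eq_decide_iff, not_lt] at h2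
      have : ¬ (l - prev ≤ -1) := by omega
      simp [this]
    · simp only [beq_iff_eq] at h1
      simp only [ne_eq, Option.some.injEq, not_not, false_eq_decide_iff, not_lt] at h2
      have habs : |l - prev| = -(l - prev) := abs_of_nonpos (by omega)
      rw [habs] at h3
      have : ¬ ((-3 : Int) ≤ l - prev) := by omega
      simp [this]
    · simp only [beq_iff_eq] at h1
      simp only [ne_eq, Option.some.injEq, not_not, false_eq_decide_iff, not_lt] at h2
      have habs : |l - prev| = -(l - prev) := abs_of_nonpos (by omega)
      rw [habs] at h3
      have hu : (-3 : Int) ≤ l - prev := by omega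
      have hv : l - prev ≤ -1 := by omega
      rw [ih]
      simp [hu, hv]

theorem reportLoopA_none (prev : Int) (rest : List Int) :
    reportLoopA prev none rest
      = (pvAllUp (pvDiffs prev rest) || pvAllDn (pvDiffs prev rest)) := by
  cases rest with
  | nil => rfl
  | cons l rs =>
    simp only [reportLoopA, pvDiffs, pvAllUp, pvAllDn, List.zipWith, List.all_cons]
    split_ifs with h1 h2 h3
    · simp only [beq_iff_eq] at h1
      subst h1
      simp
    · exact absurd rfl h2
    · have habs := abs_choice (l - prev)
      simp only [beq_iff_eq] at h1
      by_cases hgt : prev < l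
      · have habs2 : |l - prev| = l - prev := abs_of_pos (by omega)
        rw [habs2] at h3
        have h4 : ¬ (l - prev ≤ -1) := by omega
        have h5 : ¬ (1 ≤ l - prev ∧ l - prev ≤ 3) := by omega
        by_cases h6 : 1 ≤ l - prev
        · have : ¬ (l - prev ≤ 3) := by omega
          simp [h4, this]
        · simp [h4, h6]
      · have habs2 : |l - prev| = -(l - prev) := abs_of_nonpos (by omega)
        rw [habs2] at h3
        have h4 : ¬ (1 ≤ l - prev) := by omega
        by_cases h6 : (-3 : Int) ≤ l - prev
        · have : ¬ (l - prev ≤ -1) := by omega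
          simp [h4, this]
        · simp [h4, h6]
    · simp only [beq_iff_eq] at h1
      by_cases hgt : prev < l
      · have hd : decide (l > prev) = true := by simp; omega
        rw [hd, reportLoopA_some_true]
        have habs2 : |l - prev| = l - prev := abs_of_pos (by omega)
        rw [habs2] at h3
        have hu : (1 : Int) ≤ l - prev := by omega
        have hv : l - prev ≤ 3 := by omega
        have h4 : ¬ (l - prev ≤ -1) := by omega
        simp [pvAllUp, pvDiffs, hu, hv, h4]
      · have hd : decide (l > prev) = false := by simp; omega
        rw [hd, reportLoopA_some_false]
        have habs2 : |l - prev| = -(l - prev) := abs_of_nonpos (by omega)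
        rw [habs2] at h3
        have hu : (-3 : Int) ≤ l - prev := by omega
        have hv : l - prev ≤ -1 := by omega
        have h4 : ¬ (1 ≤ l - prev) := by omega
        simp [pvAllDn, pvDiffs, hu, hv, h4]

-- ===== VERDICT (by name: the statement is the Claim_ definition above) =====
theorem report_safe_spec : Claim_equal_report_safe := by
  intro report _
  unfold Spec_report_safe
  cases report with
  | nil => rfl
  | cons h t =>
    show reportLoopA h none t = report_safe_alt (h :: t)
    rw [reportLoopA_none]
    simp only [report_safe_alt, pvAllUp, pvAllDn, pvDiffs, List.tail_cons]
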